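-- pv_equiv track=rewrite | github.com/mkaxiolev-max/handrail | services/ns/nss/core/canon_docs.py | summarize_ingest
-- ===== SOURCE A (Python) =====
-- from typing import List, Dict, Optional
--
-- def summarize_ingest(results: List[Dict]) -> str:
--     """Return a human-readable boot summary line."""
--     total = len(results)
--     ingested = sum(1 for r in results if r["status"] == "ingested")
--     already = sum(1 for r in results if r["status"] == "already_loaded")
--     missing = sum(1 for r in results if r["status"] == "missing")
--
--     parts = [f"Canon docs: {total} manifest"]
--     if ingested:
--         parts.append(f"{ingested} ingested")
--     if already:
--         parts.append(f"{already} current")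
--     if missing:
--         parts.append(f"{missing} missing")
--     return " | ".join(parts)
-- ===== SOURCE B (Python) =====
-- from typing import List, Dict, Optional
--
-- def summarize_ingest(results: List[Dict]) -> str:
--     """Return a human-readable boot summary line."""
--     statuses = sorted(r["status"] for r in results)
--     runs = []  # run-length encoding of the sorted statuses, most recent run first
--     for s in statuses:
--         if runs and runs[0][0] == s:
--             runs[0] = (s, runs[0][1] + 1)
--         else:
--             runs.insert(0, (s, 1))
--
--     def run_len(key):
--         for s, n in runs:
--             if s == key:
--                 return n
--         return 0
--
--     parts = ["Canon docs: %d manifest" % len(results)]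
--     for key, label in (("ingested", "ingested"),
--                        ("already_loaded", "current"),
--                        ("missing", "missing")):
--         n = run_len(key)
--         if n:
--             parts.append("%d %s" % (n, label))
--     return " | ".join(parts)
-- ===== Notes on version B (the rewrite author's own statement) =====
-- stated objective: alternative
-- what changed: Replaces A's three filtered sum() scans with sort-then-scan: sort the statuses, run-length-encode the sorted list in one pass, then read each of the three counts as the length of its (unique) run via a first-match scan over the runs.
import Mathlib
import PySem

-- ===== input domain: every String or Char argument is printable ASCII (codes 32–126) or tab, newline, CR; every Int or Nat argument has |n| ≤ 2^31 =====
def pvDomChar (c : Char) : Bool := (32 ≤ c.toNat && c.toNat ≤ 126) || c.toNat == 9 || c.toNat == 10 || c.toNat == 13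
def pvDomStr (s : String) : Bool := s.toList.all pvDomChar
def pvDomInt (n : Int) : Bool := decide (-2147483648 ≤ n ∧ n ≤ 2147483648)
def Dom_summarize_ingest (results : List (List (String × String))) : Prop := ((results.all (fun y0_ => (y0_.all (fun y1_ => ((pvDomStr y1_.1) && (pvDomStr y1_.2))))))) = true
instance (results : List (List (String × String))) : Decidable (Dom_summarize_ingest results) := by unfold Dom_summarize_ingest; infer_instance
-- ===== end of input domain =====

-- B replaces A's three filtered sum() scans with sort + run-length encoding + first-match run lookups; same result, proved equal (objective: alternative).


-- ===== PORT A =====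
-- r["status"] : under Pre_ (every dict has the key) this getD is Python's lookup
def pvStatus (r : List (String × String)) : String :=
  PySem.Dict.getD (PySem.Dict.mk r) "status" ""

def summarize_ingest (results : List (List (String × String))) : String :=
  let total : Int := results.length
  let ingested : Int := results.foldl (fun n r => if pvStatus r == "ingested" then n + 1 else n) 0
  let already : Int := results.foldl (fun n r => if pvStatus r == "already_loaded" then n + 1 else n) 0
  let missing : Int := results.foldl (fun n r => if pvStatus r == "missing" then n + 1 else n) 0
  let parts : List String := ["Canon docs: " ++ PySem.Int.toStr total ++ " manifest"]
  let parts := if ingested ≠ 0 then parts ++ [PySem.Int.toStr ingested ++ " ingested"] else parts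
  let parts := if already ≠ 0 then parts ++ [PySem.Int.toStr already ++ " current"] else parts
  let parts := if missing ≠ 0 then parts ++ [PySem.Int.toStr missing ++ " missing"] else parts
  PySem.Str.join " | " parts

-- ===== PORT B =====
-- one step of B's run-length-encoding loop (runs kept most-recent-first)
def runStep (runs : List (String × Int)) (s : String) : List (String × Int) :=
  match runs with
  | (k, n) :: t => if k == s then (k, n + 1) :: t else (s, 1) :: (k, n) :: t
  | [] => [(s, 1)]

-- B's run_len helper: first-match scan over the runs
def runLen (runs : List (String × Int)) (key : String) : Int :=
  match runs with
  | [] => 0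
  | (s, n) :: t => if s == key then n else runLen t key

def summarize_ingest_alt (results : List (List (String × String))) : String :=
  let statuses := PySem.List.sorted (results.map pvStatus) (fun x => x) false
  let runs := statuses.foldl runStep []
  let parts0 : List String := ["Canon docs: " ++ PySem.Int.toStr (results.length : Int) ++ " manifest"]
  let table : List (String × String) := [("ingested", "ingested"), ("already_loaded", "current"), ("missing", "missing")]
  PySem.Str.join " | "
    (table.foldl
      (fun parts kl =>
        let n := runLen runs kl.1
        if n ≠ 0 then parts ++ [PySem.Int.toStr n ++ " " ++ kl.2] else parts)
      parts0)

-- ===== PRECONDITION & SPEC =====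
-- Pre_ excludes exactly the inputs where A raises KeyError: some result dict lacks the "status" key (B raises there too).
def Pre_summarize_ingest (results : List (List (String × String))) : Prop :=
  (results.all (fun r => r.any (fun p => p.1 == "status"))) = true
instance (results : List (List (String × String))) : Decidable (Pre_summarize_ingest results) := by unfold Pre_summarize_ingest; infer_instance
def pvWitness_summarize_ingest : (List (List (String × String))) := [[("status", "ingested")], [("status", "missing")]]
def Spec_summarize_ingest (results : List (List (String × String))) (out : String) : Prop := out = summarize_ingest_alt results
instance (results : List (List (String × String))) (out : String) : Decidable (Spec_summarize_ingest results out) := by unfold Spec_summarize_ingest; infer_instance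

-- ===== CLAIM (what is proved, stated in full; the proofs are below) =====
def Claim_equal_summarize_ingest : Prop := ∀ (results : List (List (String × String))), Dom_summarize_ingest results → Pre_summarize_ingest results → Spec_summarize_ingest results (summarize_ingest results)

-- ===== LEMMAS AND PROOFS =====

-- A's filtered-sum loop counts occurrences of s among the statuses.
theorem foldA_count (l : List (List (String × String))) (s : String) (n : Int) :
    l.foldl (fun n r => if pvStatus r == s then n + 1 else n) n
      = n + ((l.map pvStatus).count s : Int) := by
  induction l generalizing n with
  | nil => simp
  | cons r t ih =>
    simp only [List.foldl_cons, List.map_cons, List.count_cons, ih]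
    by_cases h : pvStatus r == s
    · simp [h]; ring
    · simp [h]

theorem runLen_eq_zero (t : List (String × Int)) (s : String)
    (h : ∀ p ∈ t, p.1 ≠ s) : runLen t s = 0 := by
  induction t with
  | nil => rfl
  | cons p t ih =>
    have h1 : p.1 ≠ s := h p (by simp)
    simp [runLen, h1, ih (fun q hq => h q (by simp [hq]))]

-- run-length encoding of a sorted tail l on top of a run stack whose head key is ≤ everything in l
theorem runs_lookup (l : List String) (k : String) (n : Int) (t : List (String × Int)) (s : String)
    (hl : List.Pairwise (· ≤ ·) l) (hk : ∀ a ∈ l, k ≤ a) (ht : ∀ p ∈ t, p.1 < k) :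
    runLen (l.foldl runStep ((k, n) :: t)) s
      = runLen ((k, n) :: t) s + (l.count s : Int) := by
  induction l generalizing k n t with
  | nil => simp
  | cons a l' ih =>
    have hpl' : List.Pairwise (· ≤ ·) l' := (List.pairwise_cons.mp hl).2
    have hal' : ∀ x ∈ l', a ≤ x := (List.pairwise_cons.mp hl).1
    have hka : k ≤ a := hk a (by simp)
    by_cases hek : k = a
    · subst hek
      have : runStep ((k, n) :: t) k = (k, n + 1) :: t := by simp [runStep]
      rw [List.foldl_cons, this, ih k (n + 1) t hpl' hal' ht]
      by_cases hs : k = s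
      · subst hs
        simp only [runLen, beq_self_eq_true, if_true, List.count_cons]
        push_cast
        ring
      · have hbs : (k == s) = false := by simp [hs]
        have hcs : ((k :: l').count s : Int) = (l'.count s : Int) := by
          simp [hs]
        rw [hcs]
        simp [runLen, hbs]
    · have hbk : (k == a) = false := by simp [hek]
      have hstep : runStep ((k, n) :: t) a = (a, 1) :: (k, n) :: t := by simp [runStep, hbk]
      have hklta : k < a := lt_of_le_of_ne hka hek
      have ht' : ∀ p ∈ (k, n) :: t, p.1 < a := by
        intro p hp
        rcases List.mem_cons.mp hp with h | h
        · rw [h]; exact hklta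
        · exact lt_trans (ht p h) hklta
      rw [List.foldl_cons, hstep, ih a 1 ((k, n) :: t) hpl' hal' ht']
      by_cases hs : a = s
      · subst hs
        have hz : runLen ((k, n) :: t) a = 0 :=
          runLen_eq_zero _ _ (fun p hp => ne_of_lt (ht' p hp))
        rw [hz]
        simp only [runLen, beq_self_eq_true, if_true, List.count_cons]
        push_cast
        ring
      · have hbs : (a == s) = false := by simp [hs]
        have hcs : ((a :: l').count s : Int) = (l'.count s : Int) := by
          simp [hs]
        rw [hcs]
        simp [runLen, hbs]

-- B's runs of a sorted list read back as counts.
theorem runs_count (l : List String) (s : String) (hl : List.Pairwise (· ≤ ·) l) :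
    runLen (l.foldl runStep []) s = (l.count s : Int) := by
  cases l with
  | nil => simp [runLen]
  | cons a l' =>
    have h0 : runStep [] a = [(a, 1)] := rfl
    rw [List.foldl_cons, h0,
      runs_lookup l' a 1 [] s (List.pairwise_cons.mp hl).2 (List.pairwise_cons.mp hl).1
        (by intro p hp; simp at hp)]
    by_cases hs : a = s
    · subst hs
      simp only [runLen, beq_self_eq_true, if_true, List.count_cons]
      push_cast
      ring
    · have hbs : (a == s) = false := by simp [hs]
      have hcs : ((a :: l').count s : Int) = (l'.count s : Int) := by
        simp [hs]
      rw [hcs]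
      simp [runLen, hbs]

-- lookup in B's runs = count in the unsorted statuses
theorem runs_count_orig (l : List String) (s : String) :
    runLen ((PySem.List.sorted l (fun x => x) false).foldl runStep []) s = (l.count s : Int) := by
  rw [runs_count _ s (by simpa using PySem.List.sorted_pairwise l (fun x => x))]
  exact_mod_cast (PySem.List.sorted_perm l (fun x => x) false).count_eq s

-- ===== VERDICT (by name: the statement is the Claim_ definition above) =====
theorem summarize_ingest_spec : Claim_equal_summarize_ingest := by
  intro results _ _
  show summarize_ingest results = summarize_ingest_alt results
  simp only [summarize_ingest, summarize_ingest_alt, List.foldl_cons, List.foldl_nil]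
  rw [foldA_count, foldA_count, foldA_count,
    runs_count_orig, runs_count_orig, runs_count_orig]
  simp only [zero_add]
  have h1 : (" " : String) ++ "ingested" = " ingested" := by decide
  have h2 : (" " : String) ++ "current" = " current" := by decide
  have h3 : (" " : String) ++ "missing" = " missing" := by decide
  simp [String.append_assoc, h1, h2, h3]
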